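-- pv_equiv track=rewrite | github.com/Ojey-egwuda/JapaPolicy-AI-Agentic- | src/workers.py | get_freshness_warning
-- ===== SOURCE A (Python) =====
-- def get_freshness_warning(query: str) -> str:
--     """Return a warning if the query relates to recently changed policy."""
--     query_lower = query.lower()
--     warnings = []
--
--     if any(word in query_lower for word in ["student", "dependant", "dependent"]) and "skilled" not in query_lower:
--         warnings.append(
--             "⚠️ Student dependant rules changed significantly in January 2024."
--         )
--
--     if any(word in query_lower for word in ["salary", "threshold", "minimum"]) and any(word in query_lower for word in ["skilled", "worker", "work"]):
--         warnings.append(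
--             "⚠️ Skilled Worker salary thresholds changed on 4 April 2024. General: £38,700, New entrant: £30,960."
--         )
--
--     if any(word in query_lower for word in ["care worker", "carer", "6135", "6136"]):
--         warnings.append(
--             "⚠️ Care workers applying on/after 11 March 2024 cannot bring dependants."
--         )
--
--     return " ".join(warnings) if warnings else ""
-- ===== SOURCE B (Python) =====
-- _KEYWORDS = ("student", "dependant", "dependent", "skilled", "salary", "threshold",
--              "minimum", "worker", "work", "care worker", "carer", "6135", "6136")
--
--
-- def get_freshness_warning(query: str) -> str:
--     """Return a warning if the query relates to recently changed policy."""
--     ql = query.lower()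
--     # One left-to-right scan over the text: at each position record every
--     # keyword that starts there; rules are then decided by set membership.
--     found = set()
--     for i in range(len(ql)):
--         for kw in _KEYWORDS:
--             if ql.startswith(kw, i):
--                 found.add(kw)
--     parts = []
--     if any(k in found for k in ("student", "dependant", "dependent")) and "skilled" not in found:
--         parts.append("⚠️ Student dependant rules changed significantly in January 2024.")
--     if any(k in found for k in ("salary", "threshold", "minimum")) and any(k in found for k in ("skilled", "worker", "work")):
--         parts.append("⚠️ Skilled Worker salary thresholds changed on 4 April 2024. General: £38,700, New entrant: £30,960.")
--     if any(k in found for k in ("care worker", "carer", "6135", "6136")):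
--         parts.append("⚠️ Care workers applying on/after 11 March 2024 cannot bring dependants.")
--     return " ".join(parts)
-- ===== Notes on version B (the rewrite author's own statement) =====
-- stated objective: alternative
-- what changed: Instead of running a separate substring search per rule keyword, B makes one left-to-right scan over the lowered query collecting every matched keyword into a set, then evaluates the three rules by set membership.
import Mathlib
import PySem

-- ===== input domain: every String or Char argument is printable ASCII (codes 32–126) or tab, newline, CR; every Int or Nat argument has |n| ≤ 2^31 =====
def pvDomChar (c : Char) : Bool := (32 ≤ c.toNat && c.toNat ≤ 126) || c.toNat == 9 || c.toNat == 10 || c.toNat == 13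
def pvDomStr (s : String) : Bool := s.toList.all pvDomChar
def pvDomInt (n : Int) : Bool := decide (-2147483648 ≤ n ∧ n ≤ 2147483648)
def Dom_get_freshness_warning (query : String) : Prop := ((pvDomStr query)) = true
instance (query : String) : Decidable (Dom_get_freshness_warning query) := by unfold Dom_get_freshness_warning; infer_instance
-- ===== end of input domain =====

-- B replaces A's per-rule repeated substring searches by ONE left-to-right scan of the
-- text that collects all matched keywords into a set, then decides the rules by set
-- membership (objective: alternative, same output).

-- ===== PORT A =====
def get_freshness_warning (query : String) : String :=
  let query_lower := PySem.Str.lower query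
  let warnings : List String := []
  let warnings :=
    if (["student", "dependant", "dependent"].any (fun word => PySem.Str.isIn word query_lower))
        && !(PySem.Str.isIn "skilled" query_lower) then
      warnings ++ ["⚠️ Student dependant rules changed significantly in January 2024."]
    else warnings
  let warnings :=
    if (["salary", "threshold", "minimum"].any (fun word => PySem.Str.isIn word query_lower))
        && (["skilled", "worker", "work"].any (fun word => PySem.Str.isIn word query_lower)) then
      warnings ++ ["⚠️ Skilled Worker salary thresholds changed on 4 April 2024. General: £38,700, New entrant: £30,960."]
    else warnings
  let warnings :=
    if (["care worker", "carer", "6135", "6136"].any (fun word => PySem.Str.isIn word query_lower)) then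
      warnings ++ ["⚠️ Care workers applying on/after 11 March 2024 cannot bring dependants."]
    else warnings
  if warnings != [] then PySem.Str.join " " warnings else ""

-- ===== PORT B =====
def pvKeywords : List String :=
  ["student", "dependant", "dependent", "skilled", "salary", "threshold",
   "minimum", "worker", "work", "care worker", "carer", "6135", "6136"]

-- the scan: for i in range(len(ql)): for kw in _KEYWORDS: if ql.startswith(kw, i): found.add(kw)
-- (ql.startswith(kw, i) with 0 ≤ i is exactly 'kw.toList is a prefix of ql.toList.drop i')
def pvFound (ql : String) : PySem.Set String :=
  (List.range ql.toList.length).foldl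
    (fun fd i =>
      pvKeywords.foldl
        (fun fd kw =>
          if PySem.Chars.startswith (ql.toList.drop i) kw.toList then PySem.Set.add fd kw else fd)
        fd)
    PySem.Set.empty

def get_freshness_warning_alt (query : String) : String :=
  let ql := PySem.Str.lower query
  let found := pvFound ql
  let parts : List String := []
  let parts :=
    if (["student", "dependant", "dependent"].any (fun k => PySem.Set.contains found k))
        && !(PySem.Set.contains found "skilled") then
      parts ++ ["⚠️ Student dependant rules changed significantly in January 2024."]
    else parts
  let parts :=
    if (["salary", "threshold", "minimum"].any (fun k => PySem.Set.contains found k))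
        && (["skilled", "worker", "work"].any (fun k => PySem.Set.contains found k)) then
      parts ++ ["⚠️ Skilled Worker salary thresholds changed on 4 April 2024. General: £38,700, New entrant: £30,960."]
    else parts
  let parts :=
    if (["care worker", "carer", "6135", "6136"].any (fun k => PySem.Set.contains found k)) then
      parts ++ ["⚠️ Care workers applying on/after 11 March 2024 cannot bring dependants."]
    else parts
  PySem.Str.join " " parts

-- ===== PRECONDITION & SPEC =====
def Spec_get_freshness_warning (query : String) (out : String) : Prop := out = get_freshness_warning_alt query
instance (query : String) (out : String) : Decidable (Spec_get_freshness_warning query out) := by unfold Spec_get_freshness_warning; infer_instance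

-- ===== CLAIM (what is proved, stated in full; the proofs are below) =====
def Claim_equal_get_freshness_warning : Prop := ∀ (query : String), Dom_get_freshness_warning query → Spec_get_freshness_warning query (get_freshness_warning query)

-- ===== LEMMAS AND PROOFS =====

-- membership in the inner keyword fold
lemma mem_inner_fold (s : List Char) (l : List String) (fd : PySem.Set String) (kw : String) :
    kw ∈ l.foldl
        (fun fd k => if PySem.Chars.startswith s k.toList then PySem.Set.add fd k else fd) fd ↔
      kw ∈ fd ∨ (kw ∈ l ∧ PySem.Chars.startswith s kw.toList = true) := by
  induction l generalizing fd with
  | nil => simp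
  | cons x xs ih =>
    simp only [List.foldl_cons]
    by_cases h : PySem.Chars.startswith s x.toList = true
    · rw [if_pos h, ih]
      simp only [PySem.Set.mem_add, List.mem_cons]
      constructor
      · rintro ((hm | hm) | ⟨hm, hp⟩)
        · exact Or.inl hm
        · exact Or.inr ⟨Or.inl hm, hm ▸ h⟩
        · exact Or.inr ⟨Or.inr hm, hp⟩
      · rintro (hm | ⟨hm | hm, hp⟩)
        · exact Or.inl (Or.inl hm)
        · exact Or.inl (Or.inr hm)
        · exact Or.inr ⟨hm, hp⟩

    · rw [if_neg h, ih]
      simp only [List.mem_cons]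
      constructor
      · rintro (hm | ⟨hm, hp⟩)
        · exact Or.inl hm
        · exact Or.inr ⟨Or.inr hm, hp⟩
      · rintro (hm | ⟨hm | hm, hp⟩)
        · exact Or.inl hm
        · exact absurd (hm ▸ hp) h
        · exact Or.inr ⟨hm, hp⟩

-- membership in the outer position fold
lemma mem_range_fold (t : List Char) (n : Nat) (kw : String) :
    kw ∈ (List.range n).foldl
        (fun fd i =>
          pvKeywords.foldl
            (fun fd k => if PySem.Chars.startswith (t.drop i) k.toList then PySem.Set.add fd k else fd)
            fd)
        PySem.Set.empty ↔
      kw ∈ pvKeywords ∧ ∃ i < n, PySem.Chars.startswith (t.drop i) kw.toList = true := by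
  induction n with
  | zero => simp [PySem.Set.empty]
  | succ n ih =>
    rw [List.range_succ, List.foldl_append, List.foldl_cons, List.foldl_nil, mem_inner_fold, ih]
    constructor
    · rintro (⟨hk, i, hi, hp⟩ | ⟨hk, hp⟩)
      · exact ⟨hk, i, Nat.lt_succ_of_lt hi, hp⟩
      · exact ⟨hk, n, Nat.lt_succ_self n, hp⟩
    · rintro ⟨hk, i, hi, hp⟩
      rcases Nat.lt_succ_iff_lt_or_eq.mp hi with h | rfl
      · exact Or.inl ⟨hk, i, h, hp⟩
      · exact Or.inr ⟨hk, hp⟩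

-- the scanned set answers exactly the substring question, for the keywords of the table
lemma contains_pvFound (ql : String) (kw : String) (hk : kw ∈ pvKeywords)
    (hne : kw.toList ≠ []) :
    PySem.Set.contains (pvFound ql) kw = PySem.Str.isIn kw ql := by
  have hmem : kw ∈ pvFound ql ↔ PySem.Chars.isIn kw.toList ql.toList := by
    rw [pvFound, mem_range_fold, ← PySem.Chars.exists_prefix_drop_iff_isIn]
    constructor
    · rintro ⟨_, i, _, hp⟩
      exact ⟨i, (PySem.Chars.startswith_iff _ _).mp hp⟩
    · rintro ⟨j, hp⟩
      refine ⟨hk, ?_⟩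
      by_cases hj : j < ql.toList.length
      · exact ⟨j, hj, (PySem.Chars.startswith_iff _ _).mpr hp⟩
      · exfalso
        have : ql.toList.drop j = [] := List.drop_eq_nil_of_le (Nat.le_of_not_lt hj)
        rw [this] at hp
        exact hne (List.prefix_nil.mp hp)
  cases h : PySem.Str.isIn kw ql with
  | true =>
    rw [PySem.Str.isIn_eq] at h
    rw [PySem.Set.contains_iff]
    exact hmem.mpr h
  | false =>
    rw [PySem.Str.isIn_eq] at h
    rw [Bool.eq_false_iff]
    intro hcontr
    have hm2 := hmem.mp ((PySem.Set.contains_iff _ _).mp hcontr)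
    rw [h] at hm2
    exact Bool.false_ne_true hm2

lemma join_if (w : List String) :
    (if w != [] then PySem.Str.join " " w else "") = PySem.Str.join " " w := by
  cases w with
  | nil => rfl
  | cons x xs => rfl

-- ===== VERDICT (by name: the statement is the Claim_ definition above) =====
theorem get_freshness_warning_spec : Claim_equal_get_freshness_warning := by
  intro query _
  unfold Spec_get_freshness_warning get_freshness_warning get_freshness_warning_alt
  have hc := fun kw hk hne => contains_pvFound (PySem.Str.lower query) kw hk hne
  simp only [List.any_cons, List.any_nil, Bool.or_false, List.nil_append]
  rw [hc "student" (by decide) (by decide), hc "dependant" (by decide) (by decide),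
      hc "dependent" (by decide) (by decide), hc "skilled" (by decide) (by decide),
      hc "salary" (by decide) (by decide), hc "threshold" (by decide) (by decide),
      hc "minimum" (by decide) (by decide), hc "worker" (by decide) (by decide),
      hc "work" (by decide) (by decide), hc "care worker" (by decide) (by decide),
      hc "carer" (by decide) (by decide), hc "6135" (by decide) (by decide),
      hc "6136" (by decide) (by decide), join_if]
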